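-- pv_equiv track=rewrite | github.com/decorouz/practices-of-the-python-pro | chapter02/decomposition.py | introduce_stooges
-- ===== SOURCE A (Python) =====
-- def introduce_stooges(names):
--     message = "The Three Stooges: "
--
--     for index, name in enumerate(names):
--         if index > 0:
--             message += ", "
--         if index == len(names) - 1:
--             message += " and "
--         message += name
--     return message
-- ===== SOURCE B (Python) =====
-- def introduce_stooges(names):
--     prefix = "The Three Stooges: "
--     if not names:
--         return prefix
--     parts = list(names[:-1]) + [" and " + names[-1]]
--     return prefix + ", ".join(parts)
-- ===== Notes on version B (the rewrite author's own statement) =====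
-- stated objective: simpler
-- what changed: Replaces A's per-index branching accumulation loop (separator before non-first, ' and ' before last) with an empty-case early return plus a single ', '.join over names[:-1] followed by ' and '+names[-1].
import Mathlib
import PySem

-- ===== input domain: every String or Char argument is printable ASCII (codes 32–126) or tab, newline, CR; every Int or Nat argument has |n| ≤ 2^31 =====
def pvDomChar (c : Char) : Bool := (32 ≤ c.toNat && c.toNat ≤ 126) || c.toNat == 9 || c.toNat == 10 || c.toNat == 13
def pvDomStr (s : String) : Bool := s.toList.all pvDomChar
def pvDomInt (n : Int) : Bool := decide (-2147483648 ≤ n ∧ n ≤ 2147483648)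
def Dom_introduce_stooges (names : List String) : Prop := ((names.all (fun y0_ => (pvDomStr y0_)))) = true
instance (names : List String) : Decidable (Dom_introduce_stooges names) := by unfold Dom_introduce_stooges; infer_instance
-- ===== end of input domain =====

-- B replaces A's per-index branching accumulation loop with a single ', '.join over
-- names[:-1] plus ' and '+names[-1] (objective: simpler decomposition; same cost).
-- Both ports work on List Char (PySem.Chars), since Lean's String.append is kernel-opaque.

-- ===== PORT A =====
-- loop body of A's 'for index, name in enumerate(names)'; message carried as List Char
def introduce_stooges (names : List String) : String :=
  String.ofList ((PySem.List.enumerate names).foldl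
    (fun message p =>
      let message := if p.1 > 0 then message ++ ", ".toList else message
      let message := if p.1 = (names.length : Int) - 1 then message ++ " and ".toList else message
      message ++ p.2.toList)
    "The Three Stooges: ".toList)

-- ===== PORT B =====
def introduce_stooges_alt (names : List String) : String :=
  match names with
  | [] => "The Three Stooges: "
  | x :: xs =>
    -- parts = list(names[:-1]) + [" and " + names[-1]];  prefix + ", ".join(parts)
    String.ofList ("The Three Stooges: ".toList ++
      PySem.Chars.join ", ".toList
        (((x :: xs).dropLast.map String.toList) ++
          [" and ".toList ++ ((x :: xs).getLast (by simp)).toList]))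

-- ===== PRECONDITION & SPEC =====
def Spec_introduce_stooges (names : List String) (out : String) : Prop := out = introduce_stooges_alt names
instance (names : List String) (out : String) : Decidable (Spec_introduce_stooges names out) := by unfold Spec_introduce_stooges; infer_instance

-- ===== CLAIM (what is proved, stated in full; the proofs are below) =====
def Claim_equal_introduce_stooges : Prop := ∀ (names : List String), Dom_introduce_stooges names → Spec_introduce_stooges names (introduce_stooges names)

-- ===== LEMMAS AND PROOFS =====

-- common value of the text after the prefix, recursing on the list of names
def stoogeBody : List String → List Char
  | [] => []
  | [x] => " and ".toList ++ x.toList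
  | x :: y :: rest => x.toList ++ ", ".toList ++ stoogeBody (y :: rest)

def stoogeStep (L : Int) (message : List Char) (p : Int × String) : List Char :=
  let message := if p.1 > 0 then message ++ ", ".toList else message
  let message := if p.1 = L - 1 then message ++ " and ".toList else message
  message ++ p.2.toList

lemma join_cons_of_ne_nil (sep a : List Char) (t : List (List Char)) (h : t ≠ []) :
    PySem.Chars.join sep (a :: t) = a ++ sep ++ PySem.Chars.join sep t := by
  cases t with
  | nil => exact absurd rfl h
  | cons z zs => exact PySem.Chars.join_cons_cons sep a z zs

-- A's loop over the tail: every index is positive, only the last index is L-1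
lemma a_loop (x : String) (xs : List String) :
    ∀ (s : Nat) (acc : List Char) (L : Int), 0 < s → (s : Int) + xs.length + 1 = L →
    (PySem.List.enumerate (x :: xs) (s : Int)).foldl (stoogeStep L) acc
      = acc ++ ", ".toList ++ stoogeBody (x :: xs) := by
  induction xs generalizing x with
  | nil =>
    intro s acc L hs hL
    have h1 : (s : Int) > 0 := by exact_mod_cast hs
    have h2 : (s : Int) = L - 1 := by simp only [List.length_nil] at hL; omega
    rw [PySem.List.enumerate_cons, PySem.List.enumerate_nil]
    simp only [List.foldl_cons, List.foldl_nil, stoogeStep, if_pos h1, if_pos h2]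
    simp [stoogeBody]
  | cons y ys ih =>
    intro s acc L hs hL
    simp only [List.length_cons] at hL
    push_cast at hL
    have h1 : (s : Int) > 0 := by exact_mod_cast hs
    have h2 : ¬ ((s : Int) = L - 1) := by omega
    rw [PySem.List.enumerate_cons, List.foldl_cons]
    have hc : ((s : Int) + 1) = ((s + 1 : Nat) : Int) := by push_cast; ring
    rw [hc, ih y (s + 1) _ L (by omega) (by push_cast; omega)]
    simp only [stoogeStep, if_pos h1, if_neg h2]
    simp [stoogeBody]

lemma a_eq_body (names : List String) :
    introduce_stooges names = String.ofList ("The Three Stooges: ".toList ++ stoogeBody names) := by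
  unfold introduce_stooges
  have hstep : (fun (message : List Char) (p : Int × String) =>
      let message := if p.1 > 0 then message ++ ", ".toList else message
      let message := if p.1 = (names.length : Int) - 1 then message ++ " and ".toList else message
      message ++ p.2.toList) = stoogeStep (names.length : Int) := rfl
  rw [hstep]
  match names with
  | [] => simp [PySem.List.enumerate_nil, stoogeBody]
  | [x] =>
    simp [PySem.List.enumerate_cons, PySem.List.enumerate_nil, stoogeStep, stoogeBody]
  | x :: y :: rest =>
    rw [PySem.List.enumerate_cons, List.foldl_cons]
    have h0 : ¬ ((0 : Int) > 0) := by omega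
    have h2 : ¬ ((0 : Int) = (((x :: y :: rest).length : Nat) : Int) - 1) := by
      push_cast [List.length_cons]; omega
    have h1 : (0 : Int) + 1 = ((1 : Nat) : Int) := by norm_num
    rw [h1, a_loop y rest 1 _ _ (by omega) (by push_cast [List.length_cons]; omega)]
    simp only [stoogeStep, if_neg h0, if_neg h2]
    simp [stoogeBody]

-- B's join over names[:-1] + [' and ' + names[-1]] equals the same body
lemma b_join (x : String) (xs : List String) :
    PySem.Chars.join ", ".toList
      (((x :: xs).dropLast.map String.toList) ++
        [" and ".toList ++ ((x :: xs).getLast (by simp)).toList])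
      = stoogeBody (x :: xs) := by
  induction xs generalizing x with
  | nil => simp [PySem.Chars.join_singleton, stoogeBody]
  | cons y ys ih =>
    have hlast : (x :: y :: ys).getLast (by simp) = (y :: ys).getLast (by simp) := by
      simp [List.getLast_cons]
    rw [show (x :: y :: ys).dropLast = x :: (y :: ys).dropLast from rfl]
    simp only [List.map_cons, List.cons_append, hlast]
    rw [join_cons_of_ne_nil _ _ _ (by simp), ih y]
    simp [stoogeBody]

-- ===== VERDICT (by name: the statement is the Claim_ definition above) =====
theorem introduce_stooges_spec : Claim_equal_introduce_stooges := by
  intro names _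
  unfold Spec_introduce_stooges
  cases names with
  | nil => rw [a_eq_body]; simp [stoogeBody, introduce_stooges_alt]
  | cons x xs =>
    simp only [introduce_stooges_alt]
    rw [a_eq_body, b_join]
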